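-- pv_equiv track=rewrite | github.com/leggedrobotics/terra | terra/viz/llms_utils.py | path_to_actions
-- ===== SOURCE A (Python) =====
-- def path_to_actions(path, initial_orientation, step_size=1):
--     """
--     Convert a path into a list of action numbers based on the current base orientation and step size.
--
--     Args:
--         path (list of tuples): The path as a list of (x, y) positions.
--         initial_orientation (str): The initial base orientation ('up', 'down', 'left', 'right').
--         step_size (int): The number of pixels the base moves forward in one step.
--
--     Returns:
--         list of int: A list of action numbers corresponding to the path.
--     """
--     # Define the mapping of directions to deltas
--     direction_deltas = {
--         "up": (-1, 0),
--         "right": (0, 1),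
--         "down": (1, 0),
--         "left": (0, -1),
--     }
--
--     # Define the order of directions for turning (90-degree increments)
--     directions = ["up", "right", "down", "left"]
--
--     # Define action numbers
--     FORWARD = 0
--     CLOCK = 2
--     ANTICLOCK = 3
--
--     # Helper function to determine the direction between two points
--     def get_direction(from_pos, to_pos):
--         delta = (to_pos[0] - from_pos[0], to_pos[1] - from_pos[1])
--         # Normalize the delta to match one of the predefined directions
--         if delta[0] != 0:
--             delta = (delta[0] // abs(delta[0]), 0)
--         elif delta[1] != 0:
--             delta = (0, delta[1] // abs(delta[1]))
--         for direction, d in direction_deltas.items():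
--             if delta == d:
--                 return direction
--         return None
--
--     # Initialize the list of actions
--     actions = []
--     current_orientation = initial_orientation
--
--     # Iterate through the simplified path
--     for i in range(len(path) - 1):
--         current_pos = path[i]
--         next_pos = path[i + 1]
--
--         # Determine the required direction to move
--         required_direction = get_direction(current_pos, next_pos)
--         if required_direction is None:
--             raise ValueError(f"Invalid direction between {current_pos} and {next_pos}")
--
--         # Determine the turns needed to face the required direction
--         while current_orientation != required_direction:
--             current_idx = directions.index(current_orientation)
--             required_idx = directions.index(required_direction)
--
--             # Determine if we need to turn right (CLOCK) or left (ANTICLOCK)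
--             if (required_idx - current_idx) % 4 == 1:  # Clockwise
--                 actions.append(CLOCK)
--                 current_orientation = directions[(current_idx + 1) % 4]
--             else:  # Counter-clockwise
--                 actions.append(ANTICLOCK)
--                 current_orientation = directions[(current_idx - 1) % 4]
--
--         # Add a single forward action for the entire straight-line segment
--         actions.append(FORWARD)
--
--     return actions
-- ===== SOURCE B (Python) =====
-- def path_to_actions(path, initial_orientation, step_size=1):
--     if len(path) < 2:
--         return []
--     idx = {"up": 0, "right": 1, "down": 2, "left": 3}
--     TURNS = {0: [], 1: [2], 2: [3, 3], 3: [3]}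
--     cur = idx[initial_orientation]
--     actions = []
--     for (r0, c0), (r1, c1) in zip(path, path[1:]):
--         if r1 != r0:
--             req = 0 if r1 < r0 else 2
--         elif c1 != c0:
--             req = 1 if c1 > c0 else 3
--         else:
--             raise ValueError(f"Invalid direction between {(r0, c0)} and {(r1, c1)}")
--         actions += TURNS[(req - cur) % 4] + [0]
--         cur = req
--     return actions
-- ===== Notes on version B (the rewrite author's own statement) =====
-- stated objective: simpler
-- what changed: Replaces the stepwise while-loop that turns one 90-degree increment at a time (with repeated list.index calls) by a closed-form turn computation: direction indices via sign tests, diff = (req - cur) % 4, and a fixed table {0:[],1:[CLOCK],2:[ANTICLOCK,ANTICLOCK],3:[ANTICLOCK]}.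
import Mathlib
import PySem

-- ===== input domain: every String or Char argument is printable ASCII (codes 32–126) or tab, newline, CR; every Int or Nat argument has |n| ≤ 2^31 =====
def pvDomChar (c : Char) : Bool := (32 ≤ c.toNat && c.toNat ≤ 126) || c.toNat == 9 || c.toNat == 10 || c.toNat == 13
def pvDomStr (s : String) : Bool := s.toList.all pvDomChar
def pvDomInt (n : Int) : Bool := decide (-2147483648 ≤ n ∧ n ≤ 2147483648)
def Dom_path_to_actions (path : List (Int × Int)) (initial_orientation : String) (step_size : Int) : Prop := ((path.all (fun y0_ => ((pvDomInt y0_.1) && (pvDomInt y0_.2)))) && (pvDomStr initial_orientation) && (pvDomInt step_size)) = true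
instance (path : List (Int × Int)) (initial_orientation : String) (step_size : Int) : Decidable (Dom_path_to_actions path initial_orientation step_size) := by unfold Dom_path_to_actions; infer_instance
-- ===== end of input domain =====

-- B replaces A's stepwise while-turning loop (repeated list.index calls) by a closed-form
-- (required - current) % 4 turn table per segment: simpler, same O(n) cost.


-- ===== PORT A =====
-- direction_deltas dict (insertion order)
def pvDirDeltas : List (String × (Int × Int)) :=
  [("up", (-1, 0)), ("right", (0, 1)), ("down", (1, 0)), ("left", (0, -1))]

def pvDirections : List String := ["up", "right", "down", "left"]

-- helper get_direction: normalize the delta (row first), then scan the dict for a match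
def pvGetDirection (fromPos toPos : Int × Int) : Option String :=
  let delta : Int × Int := (toPos.1 - fromPos.1, toPos.2 - fromPos.2)
  let delta : Int × Int :=
    if delta.1 ≠ 0 then (PySem.Int.floordiv delta.1 |delta.1|, 0)
    else if delta.2 ≠ 0 then (0, PySem.Int.floordiv delta.2 |delta.2|)
    else delta
  (pvDirDeltas.find? (fun dd => dd.2 == delta)).map (fun dd => dd.1)

-- the while-loop: turn one 90-degree step at a time until facing required_direction.
-- Fuel only makes it total: inside Pre_ both .index lookups succeed and ≤ 2 iterations run.
def pvTurnLoop : Nat → String → String → List Int → (List Int × String)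
  | 0, cur, _, acts => (acts, cur)
  | fuel + 1, cur, req, acts =>
    if cur = req then (acts, cur)
    else
      match PySem.List.index? pvDirections cur, PySem.List.index? pvDirections req with
      | some ci, some ri =>
        if PySem.Int.mod ((ri : Int) - (ci : Int)) 4 = 1 then
          pvTurnLoop fuel ((PySem.List.pyGet? pvDirections (PySem.Int.mod ((ci : Int) + 1) 4)).getD "") req (acts ++ [2])
        else
          pvTurnLoop fuel ((PySem.List.pyGet? pvDirections (PySem.Int.mod ((ci : Int) - 1) 4)).getD "") req (acts ++ [3])
      | _, _ => (acts, cur)   -- Python raises ValueError from .index here (outside Pre_)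

-- the main for-loop over consecutive positions, accumulating actions
def pvGoA : (Int × Int) → List (Int × Int) → String → List Int → List Int
  | _, [], _, acts => acts
  | cur, next :: rest, orient, acts =>
    match pvGetDirection cur next with
    | none => acts   -- Python raises ValueError here (outside Pre_)
    | some req =>
      let st := pvTurnLoop 4 orient req acts
      pvGoA next rest st.2 (st.1 ++ [0])

def path_to_actions (path : List (Int × Int)) (initial_orientation : String) (step_size : Int) : List Int :=
  match path with
  | [] => []
  | p :: rest => pvGoA p rest initial_orientation []

-- ===== PORT B =====
def pvOrientIdx : PySem.Dict String Int :=
  PySem.Dict.ofList [("up", 0), ("right", 1), ("down", 2), ("left", 3)]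

-- TURNS table keyed by (req - cur) % 4
def pvTurns (diff : Int) : List Int :=
  if diff = 1 then [2] else if diff = 2 then [3, 3] else if diff = 3 then [3] else []

-- required direction index from the signs of the delta (row first)
def pvReqIdx (p q : Int × Int) : Option Int :=
  if q.1 ≠ p.1 then some (if q.1 < p.1 then 0 else 2)
  else if q.2 ≠ p.2 then some (if q.2 > p.2 then 1 else 3)
  else none   -- Python raises ValueError here (outside Pre_)

def pvGoB : (Int × Int) → List (Int × Int) → Int → List Int
  | _, [], _ => []
  | p, q :: rest, cur =>
    match pvReqIdx p q with
    | none => []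
    | some r => pvTurns (PySem.Int.mod (r - cur) 4) ++ [0] ++ pvGoB q rest r

def path_to_actions_alt (path : List (Int × Int)) (initial_orientation : String) (step_size : Int) : List Int :=
  if path.length < 2 then []
  else
    match pvOrientIdx.get? initial_orientation with
    | none => []   -- Python raises KeyError here (outside Pre_)
    | some c =>
      match path with
      | [] => []
      | p :: rest => pvGoB p rest c

-- ===== PRECONDITION & SPEC =====
-- Pre_ excludes exactly the inputs on which A raises ValueError: a pair of equal consecutive
-- positions (zero delta), or an initial_orientation outside the four direction names when the
-- path has at least two positions (list.index fails inside the turning loop).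
def Pre_path_to_actions (path : List (Int × Int)) (initial_orientation : String) (step_size : Int) : Prop :=
  List.IsChain (fun p q => p ≠ q) path ∧
  (path.length ≤ 1 ∨ initial_orientation ∈ pvDirections)

instance (path : List (Int × Int)) (initial_orientation : String) (step_size : Int) : Decidable (Pre_path_to_actions path initial_orientation step_size) := by unfold Pre_path_to_actions; infer_instance

def pvWitness_path_to_actions : (List (Int × Int)) × String × Int :=
  ([(0, 0), (0, 1), (2, 1), (2, 0)], "up", 1)

def Spec_path_to_actions (path : List (Int × Int)) (initial_orientation : String) (step_size : Int) (out : List Int) : Prop := out = path_to_actions_alt path initial_orientation step_size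
instance (path : List (Int × Int)) (initial_orientation : String) (step_size : Int) (out : List Int) : Decidable (Spec_path_to_actions path initial_orientation step_size out) := by unfold Spec_path_to_actions; infer_instance

-- ===== CLAIM (what is proved, stated in full; the proofs are below) =====
def Claim_equal_path_to_actions : Prop := ∀ (path : List (Int × Int)) (initial_orientation : String) (step_size : Int), Dom_path_to_actions path initial_orientation step_size → Pre_path_to_actions path initial_orientation step_size → Spec_path_to_actions path initial_orientation step_size (path_to_actions path initial_orientation step_size)

-- ===== LEMMAS AND PROOFS =====

-- orientation string / index correspondence
def pvOC (s : String) (c : Int) : Prop :=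
  (s = "up" ∧ c = 0) ∨ (s = "right" ∧ c = 1) ∨ (s = "down" ∧ c = 2) ∨ (s = "left" ∧ c = 3)

lemma pvTurnLoop_ext (fuel : Nat) (cur req : String) (acts : List Int) :
    pvTurnLoop fuel cur req acts =
      (acts ++ (pvTurnLoop fuel cur req []).1, (pvTurnLoop fuel cur req []).2) := by
  induction fuel generalizing cur acts with
  | zero => simp [pvTurnLoop]
  | succ n ih =>
    by_cases h : cur = req
    · simp [pvTurnLoop, h]
    · simp only [pvTurnLoop, if_neg h]
      cases hci : PySem.List.index? pvDirections cur with
      | none => simp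
      | some ci =>
        cases hri : PySem.List.index? pvDirections req with
        | none => simp
        | some ri =>
          dsimp only
          by_cases hm : PySem.Int.mod ((ri : Int) - (ci : Int)) 4 = 1
          · simp only [if_pos hm]; rw [ih _ (acts ++ [2]), ih _ ([] ++ [2])]; simp
          · simp only [if_neg hm]; rw [ih _ (acts ++ [3]), ih _ ([] ++ [3])]; simp

lemma pvGoA_ext (rest : List (Int × Int)) (p : Int × Int) (orient : String) (acts : List Int) :
    pvGoA p rest orient acts = acts ++ pvGoA p rest orient [] := by
  induction rest generalizing p orient acts with
  | nil => simp [pvGoA]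
  | cons q rs ih =>
    simp only [pvGoA]
    cases pvGetDirection p q with
    | none => simp
    | some req =>
      simp only []
      rw [pvTurnLoop_ext _ _ _ acts, pvTurnLoop_ext _ _ _ ([])]
      simp only []
      rw [ih, ih]
      conv_rhs => rw [ih]
      simp

-- per-step: the while loop equals the closed-form turn table
lemma pvTurn_table (a b : String) (c r : Int) (ha : pvOC a c) (hb : pvOC b r) :
    pvTurnLoop 4 a b [] = (pvTurns (PySem.Int.mod (r - c) 4), b) := by
  rcases ha with ⟨h1, h2⟩ | ⟨h1, h2⟩ | ⟨h1, h2⟩ | ⟨h1, h2⟩ <;>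
    rcases hb with ⟨g1, g2⟩ | ⟨g1, g2⟩ | ⟨g1, g2⟩ | ⟨g1, g2⟩ <;>
    subst h1 h2 g1 g2 <;> decide

lemma pvSignE_pos (d : Int) (h : 0 < d) : d / |d| = 1 := by
  rw [abs_of_pos h, Int.ediv_self]; omega

lemma pvSignE_neg (d : Int) (h : d < 0) : d / |d| = -1 := by
  rw [abs_of_neg h, Int.ediv_neg, Int.ediv_self]; omega

-- the two direction computations agree (for p ≠ q)
lemma pvDir_agree (p q : Int × Int) (hpq : p ≠ q) :
    ∃ req r, pvGetDirection p q = some req ∧ pvReqIdx p q = some r ∧ pvOC req r := by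
  by_cases h1 : q.1 = p.1
  · have h2 : q.2 ≠ p.2 := by
      intro h; exact hpq (by cases p; cases q; simp_all)
    have hne : q.2 - p.2 ≠ 0 := sub_ne_zero.mpr h2
    by_cases hgt : p.2 < q.2
    · refine ⟨"right", 1, ?_, ?_, by simp [pvOC]⟩
      · simp [pvGetDirection, pvDirDeltas, h1, hne, pvSignE_pos (q.2 - p.2) (by omega)]
      · simp only [pvReqIdx, h1]; simp; omega
    · refine ⟨"left", 3, ?_, ?_, by simp [pvOC]⟩
      · simp [pvGetDirection, pvDirDeltas, h1, hne, pvSignE_neg (q.2 - p.2) (by omega)]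
      · simp only [pvReqIdx, h1]; simp; omega
  · have hne : q.1 - p.1 ≠ 0 := sub_ne_zero.mpr h1
    by_cases hlt : q.1 < p.1
    · refine ⟨"up", 0, ?_, ?_, by simp [pvOC]⟩
      · simp [pvGetDirection, pvDirDeltas, hne, pvSignE_neg (q.1 - p.1) (by omega)]
      · simp only [pvReqIdx]; simp [h1]; omega
    · refine ⟨"down", 2, ?_, ?_, by simp [pvOC]⟩
      · simp [pvGetDirection, pvDirDeltas, hne, pvSignE_pos (q.1 - p.1) (by omega)]
      · simp only [pvReqIdx]; simp [h1]; omega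

lemma pvGo_eq (rest : List (Int × Int)) (p : Int × Int) (orient : String) (c : Int)
    (hch : List.IsChain (fun a b => a ≠ b) (p :: rest)) (hoc : pvOC orient c) :
    pvGoA p rest orient [] = pvGoB p rest c := by
  induction rest generalizing p orient c with
  | nil => simp [pvGoA, pvGoB]
  | cons q rs ih =>
    have hpq : p ≠ q := (List.isChain_cons_cons.mp hch).1
    obtain ⟨req, r, hA, hB, hocr⟩ := pvDir_agree p q hpq
    simp only [pvGoA, pvGoB, hA, hB]
    rw [pvTurn_table orient req c r hoc hocr]
    simp only []
    rw [pvGoA_ext, ih q req r (List.isChain_cons_cons.mp hch).2 hocr]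

-- ===== VERDICT (by name: the statement is the Claim_ definition above) =====
theorem path_to_actions_spec : Claim_equal_path_to_actions := by
  intro path io step _ hpre
  unfold Spec_path_to_actions
  obtain ⟨hch, hor⟩ := hpre
  match path with
  | [] => rfl
  | [p] => simp [path_to_actions, path_to_actions_alt, pvGoA]
  | p :: q :: rest =>
    have hmem : io ∈ pvDirections := by
      rcases hor with h | h
      · simp at h
      · exact h
    have hc : ∃ c, pvOrientIdx.get? io = some c ∧ pvOC io c := by
      simp only [pvDirections, List.mem_cons, List.not_mem_nil, or_false] at hmem
      rcases hmem with h | h | h | h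
      · subst h; exact ⟨0, by decide, Or.inl ⟨rfl, rfl⟩⟩
      · subst h; exact ⟨1, by decide, Or.inr (Or.inl ⟨rfl, rfl⟩)⟩
      · subst h; exact ⟨2, by decide, Or.inr (Or.inr (Or.inl ⟨rfl, rfl⟩))⟩
      · subst h; exact ⟨3, by decide, Or.inr (Or.inr (Or.inr ⟨rfl, rfl⟩))⟩
    obtain ⟨c, hget, hoc⟩ := hc
    simp only [path_to_actions, path_to_actions_alt]
    rw [if_neg (by simp), hget]
    exact pvGo_eq _ p io c hch hoc
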